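-- pv_equiv track=rewrite | github.com/codalab/chagrade | apps/api/views/metrics.py | merge_list_of_lists_of_dicts
-- ===== SOURCE A (Python) =====
-- from copy import deepcopy
--
-- def merge_list_of_lists_of_dicts(input_list):
--     # Sort list by lengths of the sub-lists from greatest length to shortest length
--     sorted_input_list = sorted(input_list, key=lambda i: -len(i))
--     output_list = []
--     if len(sorted_input_list) > 0:
--         output_list = deepcopy(sorted_input_list.pop(0))
--     else:
--         return []
--     while len(sorted_input_list) > 0:
--         next_longest_list = sorted_input_list.pop(0)
--         for i in range(len(next_longest_list)):
--             output_list[i].update(next_longest_list[i])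
--     return output_list
-- ===== SOURCE B (Python) =====
-- def merge_list_of_lists_of_dicts(input_list):
--     # Column-major merge: build each output position independently by merging
--     # that column across the length-sorted lists into a fresh dict.
--     ordered = sorted(input_list, key=lambda l: -len(l))
--     n = len(ordered[0]) if ordered else 0
--     return [merge_column(ordered, i) for i in range(n)]
--
-- def merge_column(ordered, i):
--     d = {}
--     for sub in ordered:
--         if i < len(sub):
--             d.update(sub[i])
--     return d
-- ===== Notes on version B (the rewrite author's own statement) =====
-- stated objective: alternative
-- what changed: Replaces A's row-major in-place pass (deepcopy the longest list, then for each shorter list mutate a prefix of the output) with a column-major decomposition: each output position is built independently by a helper that merges that column across all sorted lists into a fresh dict.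
import Mathlib
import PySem

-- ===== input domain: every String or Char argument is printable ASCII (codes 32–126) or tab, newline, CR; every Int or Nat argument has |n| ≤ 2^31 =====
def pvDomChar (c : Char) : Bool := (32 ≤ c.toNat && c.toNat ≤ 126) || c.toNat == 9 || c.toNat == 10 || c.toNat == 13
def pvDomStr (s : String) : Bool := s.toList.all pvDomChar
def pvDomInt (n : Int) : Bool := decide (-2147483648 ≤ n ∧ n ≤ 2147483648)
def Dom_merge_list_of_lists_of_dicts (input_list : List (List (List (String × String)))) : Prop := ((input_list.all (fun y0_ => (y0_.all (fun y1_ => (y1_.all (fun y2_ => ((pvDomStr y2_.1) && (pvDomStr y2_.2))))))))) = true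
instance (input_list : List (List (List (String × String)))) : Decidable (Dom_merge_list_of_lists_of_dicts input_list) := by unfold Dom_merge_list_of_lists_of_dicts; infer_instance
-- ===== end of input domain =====

-- B replaces A's row-major in-place update pass with a column-major helper that builds each
-- output dict independently via a fresh-dict fold; alternative decomposition, same asymptotic cost.


-- ===== PORT A =====
-- d.update(e) on a Python dict, on the association-list representation
def pyDictUpdate (d e : List (String × String)) : List (String × String) :=
  (PySem.Dict.update (PySem.Dict.mk d) e).items

def merge_list_of_lists_of_dicts (input_list : List (List (List (String × String)))) : List (List (String × String)) :=
  match PySem.List.sorted input_list (fun i => -(i.length : Int)) with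
  | [] => []
  | base :: rest =>
      rest.foldl (fun output_list next_longest_list =>
        (List.range next_longest_list.length).foldl
          (fun o i => o.set i (pyDictUpdate (o.getD i []) (next_longest_list.getD i []))) output_list) base

-- ===== PORT B =====
-- merge_column(ordered, i): fold column i of the sorted lists into a fresh dict
def mergeColumn (ordered : List (List (List (String × String)))) (i : Nat) : PySem.Dict String String :=
  ordered.foldl (fun d sub => if i < sub.length then d.update (sub.getD i []) else d) PySem.Dict.empty

def merge_list_of_lists_of_dicts_alt (input_list : List (List (List (String × String)))) : List (List (String × String)) :=
  let ordered := PySem.List.sorted input_list (fun l => -(l.length : Int))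
  (List.range (ordered.headD []).length).map (fun i => (mergeColumn ordered i).items)

-- ===== PRECONDITION & SPEC =====
-- Pre_ keeps only well-formed dict representations (no inner association list with a duplicated
-- key): a Python dict always has distinct keys, so this excludes no input of the Python programs.
def Pre_merge_list_of_lists_of_dicts (input_list : List (List (List (String × String)))) : Prop :=
  ∀ grp ∈ input_list, ∀ d ∈ grp, (d.map Prod.fst).Nodup
instance (input_list : List (List (List (String × String)))) : Decidable (Pre_merge_list_of_lists_of_dicts input_list) := by unfold Pre_merge_list_of_lists_of_dicts; infer_instance

def pvWitness_merge_list_of_lists_of_dicts : (List (List (List (String × String)))) :=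
  [[[("a", "1"), ("b", "2")]], [[("a", "3")], [("c", "4")]]]

def Spec_merge_list_of_lists_of_dicts (input_list : List (List (List (String × String)))) (out : List (List (String × String))) : Prop := out = merge_list_of_lists_of_dicts_alt input_list
instance (input_list : List (List (List (String × String)))) (out : List (List (String × String))) : Decidable (Spec_merge_list_of_lists_of_dicts input_list out) := by unfold Spec_merge_list_of_lists_of_dicts; infer_instance

-- ===== CLAIM (what is proved, stated in full; the proofs are below) =====
def Claim_equal_merge_list_of_lists_of_dicts : Prop := ∀ (input_list : List (List (List (String × String)))), Dom_merge_list_of_lists_of_dicts input_list → Pre_merge_list_of_lists_of_dicts input_list → Spec_merge_list_of_lists_of_dicts input_list (merge_list_of_lists_of_dicts input_list)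

-- ===== LEMMAS AND PROOFS =====

-- the per-row body of A, rewritten index-wise: a range-fold of in-place sets is a mapIdx
theorem pv_inner_aux (out nxt : List (List (String × String))) (m : Nat)
    (hm : m ≤ nxt.length) (h : nxt.length ≤ out.length) :
    (List.range m).foldl
      (fun o i => o.set i (pyDictUpdate (o.getD i []) (nxt.getD i []))) out
    = out.mapIdx (fun i d => if i < m then pyDictUpdate d (nxt.getD i []) else d) := by
  induction m with
  | zero =>
      simp only [List.range_zero, List.foldl_nil]
      apply List.ext_getElem (by simp)
      intro j hj hj'
      simp
  | succ m ih =>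
      have hm' : m ≤ nxt.length := Nat.le_of_succ_le hm
      have hmo : m < out.length := Nat.lt_of_lt_of_le (Nat.lt_of_lt_of_le (Nat.lt_succ_self m) hm) h
      rw [List.range_succ, List.foldl_append, ih hm', List.foldl_cons, List.foldl_nil]
      have hget : ((out.mapIdx fun i d => if i < m then pyDictUpdate d (nxt.getD i []) else d).getD m [])
          = out[m] := by
        rw [List.getD_eq_getElem _ _ (by simpa using hmo)]
        simp
      rw [hget]
      apply List.ext_getElem (by simp)
      intro j hj hj'
      rcases Nat.lt_trichotomy j m with hlt | rfl | hgt
      · rw [List.getElem_set_ne (by omega)]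
        simp only [List.getElem_mapIdx]
        rw [if_pos hlt, if_pos (by omega)]
      · rw [List.getElem_set_self]
        simp only [List.getElem_mapIdx]
        rw [if_pos (by omega)]
      · rw [List.getElem_set_ne (by omega)]
        simp only [List.getElem_mapIdx]
        rw [if_neg (by omega), if_neg (by omega)]

-- A's fold, with each row body replaced by the mapIdx form
theorem pv_row_eq_mapIdx (rest : List (List (List (String × String))))
    (out : List (List (String × String)))
    (h : ∀ l ∈ rest, l.length ≤ out.length) :
    rest.foldl (fun output_list next_longest_list =>
        (List.range next_longest_list.length).foldl
          (fun o i => o.set i (pyDictUpdate (o.getD i []) (next_longest_list.getD i []))) output_list) out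
    = rest.foldl (fun o nxt =>
        o.mapIdx (fun i d => if i < nxt.length then pyDictUpdate d (nxt.getD i []) else d)) out := by
  induction rest generalizing out with
  | nil => rfl
  | cons nxt rest ih =>
      simp only [List.foldl_cons]
      rw [pv_inner_aux out nxt nxt.length le_rfl (h nxt (by simp))]
      exact ih _ (fun l hl => by
        simpa using h l (List.mem_cons_of_mem _ hl))

-- loop interchange: folding mapIdx steps equals mapping a per-index fold
theorem pv_colmajor (rest : List (List (List (String × String))))
    (out : List (List (String × String))) :
    rest.foldl (fun o nxt =>
        o.mapIdx (fun i d => if i < nxt.length then pyDictUpdate d (nxt.getD i []) else d)) out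
    = (List.range out.length).map (fun i =>
        rest.foldl (fun d sub => if i < sub.length then pyDictUpdate d (sub.getD i []) else d)
          (out.getD i [])) := by
  induction rest generalizing out with
  | nil =>
      apply List.ext_getElem (by simp)
      intro j hj hj'
      have hjo : j < out.length := by simpa using hj
      simp [List.getD, List.getElem?_eq_getElem hjo]
  | cons nxt rest ih =>
      simp only [List.foldl_cons]
      rw [ih]
      apply List.ext_getElem (by simp)
      intro j hj hj'
      have hjo : j < out.length := by simpa using hj'
      simp only [List.getElem_map, List.getElem_range]
      congr 1
      rw [List.getD_eq_getElem _ _ (by simpa using hjo),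
          List.getD_eq_getElem _ _ hjo]
      simp

-- updating the empty dict with a duplicate-free association list reproduces that list
theorem pv_update_empty (l : List (String × String)) (h : (l.map Prod.fst).Nodup) :
    PySem.Dict.update (PySem.Dict.empty) l = PySem.Dict.mk l := by
  apply PySem.Dict.ext
  have := PySem.Dict.items_foldl_insert_fresh (l := l) (k := Prod.fst) (v := Prod.snd)
    (d := PySem.Dict.empty) (by intro a _; rfl) h
  simpa [PySem.Dict.update] using this

-- B's dict-level column fold, read at the items level, is A's list-level column fold
theorem pv_fold_items (rest : List (List (List (String × String)))) (i : Nat)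
    (d : PySem.Dict String String) :
    (rest.foldl (fun d sub => if i < sub.length then d.update (sub.getD i []) else d) d).items
    = rest.foldl (fun o sub => if i < sub.length then pyDictUpdate o (sub.getD i []) else o) d.items := by
  induction rest generalizing d with
  | nil => rfl
  | cons s rest ih =>
      simp only [List.foldl_cons]
      by_cases h : i < s.length
      · rw [if_pos h, if_pos h, ih]
        rfl
      · rw [if_neg h, if_neg h, ih]

-- ===== VERDICT (by name: the statement is the Claim_ definition above) =====
theorem merge_list_of_lists_of_dicts_spec : Claim_equal_merge_list_of_lists_of_dicts := by
  intro input_list _ hpre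
  unfold Spec_merge_list_of_lists_of_dicts
  cases hs : PySem.List.sorted input_list (fun l => -(l.length : Int)) with
  | nil =>
      have hA : merge_list_of_lists_of_dicts input_list = [] := by
        unfold merge_list_of_lists_of_dicts; rw [hs]
      have hB : merge_list_of_lists_of_dicts_alt input_list = [] := by
        unfold merge_list_of_lists_of_dicts_alt; rw [hs]; rfl
      rw [hA, hB]
  | cons base rest =>
      have hbasemem : base ∈ input_list := by
        have : base ∈ PySem.List.sorted input_list (fun l => -(l.length : Int)) := by
          rw [hs]; exact List.mem_cons_self
        exact (PySem.List.mem_sorted _ _ _ _).1 this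
      have hA : merge_list_of_lists_of_dicts input_list
          = rest.foldl (fun output_list next_longest_list =>
              (List.range next_longest_list.length).foldl
                (fun o i => o.set i (pyDictUpdate (o.getD i []) (next_longest_list.getD i []))) output_list) base := by
        unfold merge_list_of_lists_of_dicts; rw [hs]
      have hB : merge_list_of_lists_of_dicts_alt input_list
          = (List.range base.length).map (fun i => (mergeColumn (base :: rest) i).items) := by
        unfold merge_list_of_lists_of_dicts_alt; rw [hs]; rfl
      have hb : ∀ y ∈ input_list, (-(base.length : Int)) ≤ -(y.length : Int) :=
        PySem.List.key_head_sorted_le input_list (fun l => -(l.length : Int)) hs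
      have hlen : ∀ l ∈ rest, l.length ≤ base.length := by
        intro l hl
        have hmem : l ∈ input_list := by
          have hm1 : l ∈ PySem.List.sorted input_list (fun l => -(l.length : Int)) := by
            rw [hs]; exact List.mem_cons_of_mem _ hl
          exact (PySem.List.mem_sorted _ _ _ _).1 hm1
        have := hb l hmem
        omega
      rw [hA, hB, pv_row_eq_mapIdx rest base hlen, pv_colmajor]
      apply List.map_congr_left
      intro i hi
      have hib : i < base.length := List.mem_range.mp hi
      have hstart : mergeColumn (base :: rest) i
          = rest.foldl (fun d sub => if i < sub.length then d.update (sub.getD i []) else d)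
              (PySem.Dict.update PySem.Dict.empty (base.getD i [])) := by
        unfold mergeColumn
        rw [List.foldl_cons, if_pos hib]
      have hnd : ((base.getD i []).map Prod.fst).Nodup := by
        rw [List.getD_eq_getElem _ _ hib]
        exact hpre base hbasemem _ (List.getElem_mem hib)
      rw [hstart, pv_fold_items, pv_update_empty _ hnd]
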